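-- pv_equiv track=rewrite | github.com/ASSERT-KTH/Mokav | experiments/pynguin/c4b/single-return/generated_tests/src_587/4/src_587.py | func
-- ===== SOURCE A (Python) =====
-- def func(*args):
--
-- 	a = int(args[0])
-- 	b = ''
-- 	for r in range(1, (a + 1)):
-- 	    if ((r == a) and ((r % 2) == 1)):
-- 	        b = (b + 'I hate it')
-- 	    elif ((r == a) and ((r % 2) == 0)):
-- 	        b = (b + 'I love it')
-- 	    elif ((r % 2) == 1):
-- 	        b = (b + 'I hate that ')
-- 	    else:
-- 	        b = (b + 'I love that ')
-- 	return(b)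
-- ===== SOURCE B (Python) =====
-- def func(*args):
--     a = int(args[0])
--     tokens = ['I hate' if r % 2 == 1 else 'I love' for r in range(1, a + 1)]
--     if not tokens:
--         return ''
--     return ' that '.join(tokens) + ' it'
-- ===== Notes on version B (the rewrite author's own statement) =====
-- stated objective: simpler
-- what changed: Replaces the in-loop last-element/parity 4-way branch by building the parity token list once and factoring the separator and suffix out of the iteration via ' that '.join(tokens) + ' it'.
import Mathlib
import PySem

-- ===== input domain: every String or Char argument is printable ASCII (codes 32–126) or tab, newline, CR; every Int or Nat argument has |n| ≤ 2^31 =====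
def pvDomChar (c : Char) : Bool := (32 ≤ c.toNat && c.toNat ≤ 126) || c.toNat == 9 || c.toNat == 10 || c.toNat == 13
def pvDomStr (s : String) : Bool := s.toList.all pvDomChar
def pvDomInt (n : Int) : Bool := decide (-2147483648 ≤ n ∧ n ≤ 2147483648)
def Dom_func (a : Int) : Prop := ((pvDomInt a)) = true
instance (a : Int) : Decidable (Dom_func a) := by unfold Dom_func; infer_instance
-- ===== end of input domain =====

-- B builds the parity token list once and factors the separator and the " it" suffix out of the loop via a join; objective: simpler.

-- ===== PORT A =====
def func (a : Int) : String :=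
  (PySem.List.pyRange 1 (a + 1) 1).foldl (fun b r =>
    if r == a && PySem.Int.mod r 2 == 1 then b ++ "I hate it"
    else if r == a && PySem.Int.mod r 2 == 0 then b ++ "I love it"
    else if PySem.Int.mod r 2 == 1 then b ++ "I hate that "
    else b ++ "I love that ") ""

-- ===== PORT B =====
def func_alt (a : Int) : String :=
  let tokens := (PySem.List.pyRange 1 (a + 1) 1).map
    (fun r => if PySem.Int.mod r 2 == 1 then "I hate" else "I love")
  if tokens.isEmpty then "" else PySem.Str.join " that " tokens ++ " it"

-- ===== PRECONDITION & SPEC =====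
def Spec_func (a : Int) (out : String) : Prop := out = func_alt a
instance (a : Int) (out : String) : Decidable (Spec_func a out) := by unfold Spec_func; infer_instance

-- ===== CLAIM (what is proved, stated in full; the proofs are below) =====
def Claim_equal_func : Prop := ∀ (a : Int), Dom_func a → Spec_func a (func a)

-- ===== LEMMAS AND PROOFS =====

-- B's per-element token, and A's loop restricted to the non-last elements
def pvTok (r : Int) : String := if PySem.Int.mod r 2 == 1 then "I hate" else "I love"

def pvP (a : Int) : String :=
  (PySem.List.pyRange 1 a 1).foldl (fun b r => b ++ pvTok r ++ " that ") ""

theorem pvMod2 (n : Int) : PySem.Int.mod n 2 = 0 ∨ PySem.Int.mod n 2 = 1 := by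
  simp only [PySem.Int.mod]
  rw [Int.fmod_eq_emod]; omega

theorem pvTok_that (b : String) (r : Int) :
    (if PySem.Int.mod r 2 == 1 then b ++ "I hate that " else b ++ "I love that ")
      = b ++ pvTok r ++ " that " := by
  have h1 : "I hate" ++ " that " = ("I hate that " : String) := by decide
  have h2 : "I love" ++ " that " = ("I love that " : String) := by decide
  unfold pvTok
  split_ifs <;> rw [String.append_assoc] <;> simp [h1, h2]

theorem funcA_eq (n : Int) (hn : 1 ≤ n) :
    func n = pvP n ++ pvTok n ++ " it" := by
  unfold func pvP
  rw [PySem.List.pyRange_one_succ_right hn, List.foldl_append]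
  have hstep : ∀ (b : String) (r : Int), r ∈ PySem.List.pyRange 1 n 1 →
      (if r == n && PySem.Int.mod r 2 == 1 then b ++ "I hate it"
       else if r == n && PySem.Int.mod r 2 == 0 then b ++ "I love it"
       else if PySem.Int.mod r 2 == 1 then b ++ "I hate that "
       else b ++ "I love that ")
      = b ++ pvTok r ++ " that " := by
    intro b r hr
    rw [PySem.List.mem_pyRange_one] at hr
    have hne : (r == n) = false := by
      simp only [beq_eq_false_iff_ne]; omega
    rw [hne]
    simp only [Bool.false_and, if_neg Bool.false_ne_true]
    exact pvTok_that b r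
  rw [PySem.List.foldl_congr_mem (PySem.List.pyRange 1 n 1) _ (fun b r => b ++ pvTok r ++ " that ") "" hstep]
  simp only [List.foldl_cons, List.foldl_nil, beq_self_eq_true, Bool.true_and]
  have hit : "I hate" ++ " it" = ("I hate it" : String) := by decide
  have lit : "I love" ++ " it" = ("I love it" : String) := by decide
  unfold pvTok
  rcases pvMod2 n with h | h <;> rw [h] <;>
    simp [String.append_assoc, hit, lit]

theorem pvJoin_snoc (sep y : String) (xs : List String) (h : xs ≠ []) :
    PySem.Str.join sep (xs ++ [y]) = PySem.Str.join sep xs ++ sep ++ y := by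
  apply String.toList_inj.mp
  simp only [String.toList_append, PySem.Str.toList_join, List.map_append, List.map_cons,
    List.map_nil]
  induction xs with
  | nil => exact absurd rfl h
  | cons x xs ih =>
      cases xs with
      | nil =>
          rw [List.map_cons, List.map_nil, PySem.Chars.join_singleton]
          simp [PySem.Chars.join_cons_cons, PySem.Chars.join_singleton]
      | cons x' rest =>
          have ih' := ih (by simp)
          simp only [List.map_cons, List.cons_append, PySem.Chars.join_cons_cons] at ih' ⊢
          rw [ih']
          simp [List.append_assoc]

theorem pvJoin_eq (m : Nat) :
    PySem.Str.join " that " ((PySem.List.pyRange 1 ((m : Int) + 1 + 1) 1).map pvTok)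
      = pvP ((m : Int) + 1) ++ pvTok ((m : Int) + 1) := by
  induction m with
  | zero => decide
  | succ k ih =>
      have h1 : (1 : Int) ≤ (k : Int) + 1 := by omega
      rw [show ((k + 1 : Nat) : Int) + 1 + 1 = ((k : Int) + 1 + 1) + 1 by push_cast; ring,
        PySem.List.pyRange_one_succ_right (by omega : (1:Int) ≤ (k : Int) + 1 + 1),
        List.map_append, List.map_singleton]
      have hne : ((PySem.List.pyRange 1 ((k : Int) + 1 + 1) 1).map pvTok) ≠ [] := by
        rw [PySem.List.pyRange_one_succ_right h1]; simp
      rw [pvJoin_snoc _ _ _ hne, ih]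
      unfold pvP
      rw [show ((k + 1 : Nat) : Int) + 1 = ((k : Int) + 1) + 1 by push_cast; ring,
        PySem.List.pyRange_one_succ_right h1, List.foldl_append]
      simp [String.append_assoc]

-- ===== VERDICT (by name: the statement is the Claim_ definition above) =====
theorem func_spec : Claim_equal_func := by
  intro a _
  unfold Spec_func func_alt
  by_cases ha : a ≤ 0
  · have h : PySem.List.pyRange 1 (a + 1) 1 = [] :=
      PySem.List.pyRange_one_eq_nil (by omega)
    unfold func
    rw [h]; simp
  · have h1 : 1 ≤ a := by omega
    obtain ⟨m, hm⟩ : ∃ m : Nat, a = (m : Int) + 1 :=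
      ⟨(a - 1).toNat, by omega⟩
    subst hm
    have hne : ¬ ((PySem.List.pyRange 1 ((m : Int) + 1 + 1) 1).map pvTok).isEmpty := by
      rw [PySem.List.pyRange_one_succ_right (by omega : (1:Int) ≤ (m:Int)+1)]
      simp
    simp only [show (fun r : Int => if PySem.Int.mod r 2 == 1 then "I hate" else "I love") = pvTok from rfl]
    rw [if_neg (by simpa using hne)]
    rw [pvJoin_eq m, funcA_eq _ h1]
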